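-- pv_equiv track=rewrite | github.com/dpiresearch/SatConOps | app.py | _flatten_risks
-- ===== SOURCE A (Python) =====
-- def _flatten_risks(risks_by_phase):
--     risks = []
--     for phase, phase_risks in (risks_by_phase or {}).items():
--         for idx, risk in enumerate(phase_risks or [], 1):
--             risks.append({
--                 "id": f"R-{len(risks) + 1:03d}",
--                 "phase": phase,
--                 "status": "Open",
--                 **risk,
--             })
--     return risks
-- ===== SOURCE B (Python) =====
-- def _flatten_risks(risks_by_phase):
--     blocks = list((risks_by_phase or {}).items())
--     starts, total = [], 1
--     for _, phase_risks in blocks: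
--         starts.append(total)
--         total += len(phase_risks or [])
--     return [{"id": f"R-{start + j:03d}", "phase": phase, "status": "Open", **risk}
--             for (phase, phase_risks), start in zip(blocks, starts)
--             for j, risk in enumerate(phase_risks or [])]
-- ===== Notes on version B (the rewrite author's own statement) =====
-- stated objective: alternative
-- what changed: Replaces A's single interleaved accumulation, where each id is read off the growing result's length, by staged passes: a prefix-sum pass first computes each phase's starting id from the phase-list lengths, then the records are emitted per phase block from that offset table, so numbering never consults the output being built.
import Mathlib
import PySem

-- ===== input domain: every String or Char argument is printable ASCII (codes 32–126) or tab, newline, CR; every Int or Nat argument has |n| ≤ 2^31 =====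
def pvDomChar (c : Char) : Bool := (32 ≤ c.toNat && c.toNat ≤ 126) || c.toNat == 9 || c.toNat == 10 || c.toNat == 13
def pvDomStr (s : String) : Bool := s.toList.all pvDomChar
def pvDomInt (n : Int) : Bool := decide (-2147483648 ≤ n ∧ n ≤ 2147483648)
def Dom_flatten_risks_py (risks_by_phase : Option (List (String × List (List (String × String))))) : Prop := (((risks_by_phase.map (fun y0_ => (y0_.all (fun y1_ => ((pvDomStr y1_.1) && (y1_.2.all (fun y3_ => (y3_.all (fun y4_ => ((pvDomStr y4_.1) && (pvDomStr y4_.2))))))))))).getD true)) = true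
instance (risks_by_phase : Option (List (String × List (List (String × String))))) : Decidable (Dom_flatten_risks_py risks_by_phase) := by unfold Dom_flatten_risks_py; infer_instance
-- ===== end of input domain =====

-- B replaces A's interleaved accumulation (id = length of the growing result) by staged passes:
-- a prefix-sum pass computes each phase's starting id, then records are emitted per phase block.

-- f"R-{n:03d}" — exact for n ≥ 0 (both programs only format positive counters)
def pvFmt3 (n : Int) : String :=
  let cs := PySem.Int.toChars n
  String.ofList ('R' :: '-' :: (List.replicate (3 - cs.length) '0' ++ cs))

-- the dict literal {"id": …, "phase": …, "status": "Open", **risk} (shared by both Pythons verbatim)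
def pvMkRisk (n : Int) (phase : String) (risk : List (String × String)) : List (String × String) :=
  (risk.foldl (fun d p => d.insert p.1 p.2)
    (PySem.Dict.ofList [("id", pvFmt3 n), ("phase", phase), ("status", "Open")])).items

-- ===== PORT A =====
def flatten_risks_py (risks_by_phase : Option (List (String × List (List (String × String))))) : List (List (String × String)) :=
  (risks_by_phase.getD []).foldl
    (fun risks pr =>
      (PySem.List.enumerate pr.2 1).foldl
        (fun risks ir => risks ++ [pvMkRisk ((risks.length : Int) + 1) pr.1 ir.2]) risks)
    []

-- ===== PORT B =====
def flatten_risks_py_alt (risks_by_phase : Option (List (String × List (List (String × String))))) : List (List (String × String)) :=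
  let blocks := risks_by_phase.getD []
  -- the prefix-sum loop building `starts`
  let starts := (blocks.foldl
      (fun (st : List Int × Int) pr => (st.1 ++ [st.2], st.2 + (pr.2.length : Int)))
      ([], 1)).1
  -- the flat comprehension over zip(blocks, starts)
  (blocks.zip starts).flatMap
    (fun bs => (PySem.List.enumerate bs.1.2 0).map
      (fun jr => pvMkRisk (bs.2 + jr.1) bs.1.1 jr.2))

-- ===== PRECONDITION & SPEC =====
def Spec_flatten_risks_py (risks_by_phase : Option (List (String × List (List (String × String))))) (out : List (List (String × String))) : Prop := out = flatten_risks_py_alt risks_by_phase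
instance (risks_by_phase : Option (List (String × List (List (String × String))))) (out : List (List (String × String))) : Decidable (Spec_flatten_risks_py risks_by_phase out) := by unfold Spec_flatten_risks_py; infer_instance

-- ===== CLAIM (what is proved, stated in full; the proofs are below) =====
def Claim_equal_flatten_risks_py : Prop := ∀ (risks_by_phase : Option (List (String × List (List (String × String))))), Dom_flatten_risks_py risks_by_phase → Spec_flatten_risks_py risks_by_phase (flatten_risks_py risks_by_phase)

-- ===== LEMMAS AND PROOFS =====

-- canonical form both ports are reduced to: per-phase blocks numbered from a start counter
def pvCanon : List (String × List (List (String × String))) → Int → List (List (String × String))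
  | [], _ => []
  | pr :: rest, start =>
      ((PySem.List.enumerate pr.2 0).map (fun jr => pvMkRisk (start + jr.1) pr.1 jr.2))
        ++ pvCanon rest (start + (pr.2.length : Int))

-- the starts list the prefix-sum foldl computes
def pvStarts : List (String × List (List (String × String))) → Int → List Int
  | [], _ => []
  | pr :: rest, s => s :: pvStarts rest (s + (pr.2.length : Int))

theorem pv_starts_foldl :
    ∀ (l : List (String × List (List (String × String)))) (acc : List Int) (s : Int),
      (l.foldl (fun (st : List Int × Int) pr => (st.1 ++ [st.2], st.2 + (pr.2.length : Int)))
        (acc, s)).1 = acc ++ pvStarts l s := by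
  intro l
  induction l with
  | nil => intro acc s; simp [pvStarts]
  | cons pr rest ih => intro acc s; rw [List.foldl_cons, ih, pvStarts]; simp

theorem pv_zip_canon :
    ∀ (l : List (String × List (List (String × String)))) (s : Int),
      (l.zip (pvStarts l s)).flatMap
        (fun bs => (PySem.List.enumerate bs.1.2 0).map
          (fun jr => pvMkRisk (bs.2 + jr.1) bs.1.1 jr.2))
      = pvCanon l s := by
  intro l
  induction l with
  | nil => intro s; simp [pvCanon]
  | cons pr rest ih => intro s; simp only [pvStarts, List.zip_cons_cons, List.flatMap_cons, pvCanon, ih]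

-- shifting the start index of enumerate under a map
theorem pv_enum_shift (p : String) :
    ∀ (l : List (List (String × String))) (s t : Int),
      (PySem.List.enumerate l (s + t)).map (fun ip => pvMkRisk ip.1 p ip.2)
        = (PySem.List.enumerate l t).map (fun jr => pvMkRisk (s + jr.1) p jr.2) := by
  intro l
  induction l with
  | nil => intro s t; simp [PySem.List.enumerate_nil]
  | cons x xs ih =>
    intro s t
    rw [PySem.List.enumerate_cons, PySem.List.enumerate_cons]
    simp only [List.map_cons]
    rw [show s + t + 1 = s + (t + 1) by ring, ih]

-- A's inner loop appended to an accumulator equals the accumulator plus a numbered block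
theorem pv_inner (p : String) :
    ∀ (prs : List (List (String × String))) (s : Int) (acc : List (List (String × String))),
      (PySem.List.enumerate prs s).foldl
        (fun risks ir => risks ++ [pvMkRisk ((risks.length : Int) + 1) p ir.2]) acc
      = acc ++ (PySem.List.enumerate prs ((acc.length : Int) + 1)).map
          (fun ip => pvMkRisk ip.1 p ip.2) := by
  intro prs
  induction prs with
  | nil => intro s acc; simp [PySem.List.enumerate_nil]
  | cons r rs ih =>
    intro s acc
    rw [PySem.List.enumerate_cons, PySem.List.enumerate_cons, List.foldl_cons, ih]
    simp only [List.map_cons, List.length_append, List.length_cons, List.length_nil]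
    push_cast
    rw [List.append_assoc]
    ring_nf
    simp

-- A's outer loop equals the accumulator plus the canonical form started at acc.length + 1
theorem pv_outer :
    ∀ (items : List (String × List (List (String × String)))) (acc : List (List (String × String))),
      items.foldl
        (fun risks pr =>
          (PySem.List.enumerate pr.2 1).foldl
            (fun risks ir => risks ++ [pvMkRisk ((risks.length : Int) + 1) pr.1 ir.2]) risks) acc
      = acc ++ pvCanon items ((acc.length : Int) + 1) := by
  intro items
  induction items with
  | nil => intro acc; simp [pvCanon]
  | cons pr rest ih =>
    intro acc
    rw [List.foldl_cons, pv_inner, ih, pvCanon]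
    rw [show ((acc.length : Int) + 1) = ((acc.length : Int) + 1) + 0 by ring,
        pv_enum_shift]
    simp only [List.append_assoc, List.length_append, List.length_map,
      PySem.List.length_enumerate]
    push_cast
    ring_nf

-- ===== VERDICT (by name: the statement is the Claim_ definition above) =====
theorem flatten_risks_py_spec : Claim_equal_flatten_risks_py := by
  intro rbp _
  unfold Spec_flatten_risks_py flatten_risks_py flatten_risks_py_alt
  rw [pv_outer]
  simp only []
  rw [pv_starts_foldl]
  simp only [List.nil_append]
  rw [pv_zip_canon]
  norm_num
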